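-- pv_equiv track=rewrite | github.com/qw-chee/lexical | Neighbours.py | find_position_neighbours
-- ===== SOURCE A (Python) =====
-- def find_position_neighbours(word, corpus):
--     '''
--     Returns a list with number of entries = len(word) and each entry being the number of neighbours at that position.
--     :param word: tokenised word.
--     :param corpus: dictionary mapping word as string to tokenised word as list.
--     '''
--     result = [0 for i in range(len(word))]
--     for w in corpus:
--         w = corpus[w]
--         if len(w) != len(word):
--             continue
--         for idx in range(len(w)):
--             if w[:idx] == word[:idx] and w[idx+1:] == word[idx+1:] and w[idx] != word[idx]:
--                 result[idx] += 1
--     return result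
-- ===== SOURCE B (Python) =====
-- def find_position_neighbours(word, corpus):
--     n = len(word)
--     result = [0] * n
--     for w in corpus.values():
--         if len(w) != n:
--             continue
--         count = 0
--         mism = -1
--         for i, (a, b) in enumerate(zip(w, word)):
--             if a != b:
--                 count += 1
--                 if count > 1:
--                     break
--                 mism = i
--         if count == 1:
--             result[mism] += 1
--     return result
-- ===== Notes on version B (the rewrite author's own statement) =====
-- stated objective: alternative
-- what changed: A tests every index with two slice comparisons per same-length corpus word; B makes one left-to-right scan per same-length word counting mismatches with early exit, incrementing the unique mismatch position when the count is exactly one; it trades A's per-index slice tests for one mismatch-counting pass. Pre_ only excludes association lists with duplicate keys, which no Python dict can produce.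
import Mathlib
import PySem

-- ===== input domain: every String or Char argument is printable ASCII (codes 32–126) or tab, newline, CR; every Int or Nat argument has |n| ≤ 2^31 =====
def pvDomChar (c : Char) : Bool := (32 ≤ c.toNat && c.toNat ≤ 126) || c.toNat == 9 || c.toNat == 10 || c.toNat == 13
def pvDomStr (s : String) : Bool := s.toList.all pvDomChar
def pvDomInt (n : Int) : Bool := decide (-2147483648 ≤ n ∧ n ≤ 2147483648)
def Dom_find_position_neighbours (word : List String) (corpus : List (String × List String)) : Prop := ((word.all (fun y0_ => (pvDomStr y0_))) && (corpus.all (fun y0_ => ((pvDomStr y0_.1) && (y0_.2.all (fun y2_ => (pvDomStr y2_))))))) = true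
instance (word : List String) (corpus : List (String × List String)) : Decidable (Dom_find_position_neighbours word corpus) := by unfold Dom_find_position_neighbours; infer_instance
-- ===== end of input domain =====

-- B replaces A's per-index pair of slice comparisons with a single mismatch-counting scan
-- (early exit after a second mismatch) per same-length corpus word (alternative algorithm).

-- ===== PORT A =====
-- inner loop body: 'for idx in range(len(w)): if w[:idx]==word[:idx] and w[idx+1:]==word[idx+1:] and w[idx]!=word[idx]: result[idx] += 1'
-- (idx ranges over 0..len(w)-1, so the slices are take/drop and w[idx] is in range: exact)
def pvInnerA (word w : List String) (result : List Int) : List Int :=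
  (List.range w.length).foldl (fun res idx =>
    if w.take idx = word.take idx ∧ w.drop (idx + 1) = word.drop (idx + 1) ∧ w[idx]? ≠ word[idx]? then
      res.set idx (res.getD idx 0 + 1)
    else res) result

def find_position_neighbours (word : List String) (corpus : List (String × List String)) : List Int :=
  -- result = [0 for i in range(len(word))]
  let result := (List.range word.length).map (fun _ => (0 : Int))
  -- for w in corpus: w = corpus[w]  (dict key lookup = first match)
  corpus.foldl (fun result kv =>
    let w := (PySem.Dict.mk corpus).getD kv.1 []
    if w.length ≠ word.length then result
    else pvInnerA word w result) result

-- ===== PORT B =====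
-- 'for i,(a,b) in enumerate(zip(w, word)): if a != b: count += 1; if count > 1: break; mism = i'
def pvScanB : List (String × String) → Nat → Nat × Int → Nat × Int
  | [], _, st => st
  | (a, b) :: rest, i, (count, mism) =>
    if a ≠ b then
      if count + 1 > 1 then (count + 1, mism)   -- break
      else pvScanB rest (i + 1) (count + 1, (i : Int))
    else pvScanB rest (i + 1) (count, mism)

def find_position_neighbours_alt (word : List String) (corpus : List (String × List String)) : List Int :=
  let n := word.length
  let result := List.replicate n (0 : Int)
  corpus.foldl (fun result kv =>
    let w := kv.2
    if w.length ≠ n then result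
    else
      let st := pvScanB (w.zip word) 0 (0, -1)
      if st.1 = 1 then
        -- count == 1 forces mism = the scanned index ≥ 0, so .toNat is exact here
        result.set st.2.toNat (result.getD st.2.toNat 0 + 1)
      else result) result

-- ===== PRECONDITION & SPEC =====
-- Pre_ excludes only association lists with duplicate keys, which no Python dict can produce
-- (A looks each key up by first match, B reads the stored value; they coincide exactly for genuine dicts).
def Pre_find_position_neighbours (word : List String) (corpus : List (String × List String)) : Prop :=
  (corpus.map Prod.fst).Nodup
instance (word : List String) (corpus : List (String × List String)) : Decidable (Pre_find_position_neighbours word corpus) := by unfold Pre_find_position_neighbours; infer_instance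
def pvWitness_find_position_neighbours : List String × (List (String × List String)) :=
  (["a", "b"], [("ab", ["a", "c"]), ("xy", ["a"])])
def Spec_find_position_neighbours (word : List String) (corpus : List (String × List String)) (out : List Int) : Prop := out = find_position_neighbours_alt word corpus
instance (word : List String) (corpus : List (String × List String)) (out : List Int) : Decidable (Spec_find_position_neighbours word corpus out) := by unfold Spec_find_position_neighbours; infer_instance

-- ===== CLAIM (what is proved, stated in full; the proofs are below) =====
def Claim_equal_find_position_neighbours : Prop := ∀ (word : List String) (corpus : List (String × List String)), Dom_find_position_neighbours word corpus → Pre_find_position_neighbours word corpus → Spec_find_position_neighbours word corpus (find_position_neighbours word corpus)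

-- ===== LEMMAS AND PROOFS =====

-- indices at which the two zipped words differ
def pvDiff : List (String × String) → List Nat
  | [] => []
  | (a, b) :: rest => if a = b then (pvDiff rest).map (· + 1) else 0 :: (pvDiff rest).map (· + 1)

theorem pvDiff_lt_length : ∀ (l : List (String × String)) (j : Nat), j ∈ pvDiff l → j < l.length := by
  intro l
  induction l with
  | nil => intro j h; simp [pvDiff] at h
  | cons p rest ih =>
    obtain ⟨a, b⟩ := p
    intro j h
    simp only [pvDiff] at h
    split at h
    · simp only [List.mem_map] at h
      obtain ⟨k, hk, rfl⟩ := h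
      have := ih k hk; simp; omega
    · rcases List.mem_cons.mp h with rfl | h
      · simp
      · simp only [List.mem_map] at h
        obtain ⟨k, hk, rfl⟩ := h
        have := ih k hk; simp; omega

theorem pvDiff_nil_iff : ∀ (w word : List String), w.length = word.length →
    (pvDiff (w.zip word) = [] ↔ w = word) := by
  intro w
  induction w with
  | nil => intro word h; cases word <;> simp [pvDiff] at h ⊢
  | cons a as ih =>
    intro word h
    cases word with
    | nil => simp at h
    | cons b bs =>
      simp only [List.length_cons, Nat.add_right_cancel_iff] at h
      simp only [List.zip_cons_cons, pvDiff]
      by_cases hab : a = b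
      · simp [hab, List.map_eq_nil_iff, ih bs h]
      · simp only [if_neg hab]
        constructor
        · intro h'; cases h'
        · intro h'; exact absurd (List.cons_eq_cons.mp h').1 hab

-- B's scan, started with count = 1, only decides whether any further mismatch occurs
theorem pvScanB_one : ∀ (l : List (String × String)) (i : Nat) (m : Int),
    pvScanB l i (1, m) = if pvDiff l = [] then (1, m) else (2, m) := by
  intro l
  induction l with
  | nil => intro i m; simp [pvScanB, pvDiff]
  | cons p rest ih =>
    obtain ⟨a, b⟩ := p
    intro i m
    by_cases hab : a = b
    · simp [pvScanB, pvDiff, hab, ih, List.map_eq_nil_iff]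
    · simp [pvScanB, pvDiff, hab]

-- B's scan from the initial state, characterised by the mismatch-index list
theorem pvScanB_zero : ∀ (l : List (String × String)) (i : Nat) (m : Int),
    pvScanB l i (0, m) =
      match pvDiff l with
      | [] => (0, m)
      | j :: rest => (if rest = [] then 1 else 2, ((i + j : Nat) : Int)) := by
  intro l
  induction l with
  | nil => intro i m; simp [pvScanB, pvDiff]
  | cons p rest ih =>
    obtain ⟨a, b⟩ := p
    intro i m
    by_cases hab : a = b
    · have h1 : pvScanB ((a, b) :: rest) i (0, m) = pvScanB rest (i + 1) (0, m) := by
        simp [pvScanB, hab]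
      rw [h1, ih]
      simp only [pvDiff, if_pos hab]
      cases h : pvDiff rest with
      | nil => simp
      | cons j js =>
        simp only [List.map_cons]
        have hi : i + 1 + j = i + (j + 1) := by omega
        simp [hi]
    · have h1 : pvScanB ((a, b) :: rest) i (0, m) = pvScanB rest (i + 1) (1, (i : Int)) := by
        simp [pvScanB, hab]
      rw [h1, pvScanB_one]
      simp only [pvDiff, if_neg hab]
      cases h : pvDiff rest with
      | nil => simp
      | cons j js => simp

-- A's per-index slice condition holds exactly when idx is the unique mismatch index
theorem pvCondA_iff : ∀ (idx : Nat) (w word : List String), w.length = word.length →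
    ((w.take idx = word.take idx ∧ w.drop (idx + 1) = word.drop (idx + 1) ∧ w[idx]? ≠ word[idx]?)
      ↔ pvDiff (w.zip word) = [idx]) := by
  intro idx
  induction idx with
  | zero =>
    intro w word h
    cases w with
    | nil =>
      cases word with
      | nil => simp [pvDiff]
      | cons b bs => simp only [List.length_nil, List.length_cons] at h; omega
    | cons a as =>
      cases word with
      | nil => simp at h
      | cons b bs =>
        simp only [List.length_cons, Nat.add_right_cancel_iff] at h
        simp only [List.take_zero, List.drop_succ_cons, List.drop_zero, List.zip_cons_cons,
          pvDiff, List.getElem?_cons_zero, true_and]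
        by_cases hab : a = b
        · constructor
          · rintro ⟨-, hne⟩; exact absurd (by simp [hab]) hne
          · intro hc; rw [if_pos hab] at hc
            rcases List.map_eq_cons_iff.mp hc with ⟨k, -, -, hk0, -⟩
            omega
        · rw [if_neg hab]
          constructor
          · rintro ⟨hs, -⟩
            simp [(pvDiff_nil_iff as bs h).mpr hs]
          · intro hc
            have : pvDiff (as.zip bs) = [] := by
              simpa [List.map_eq_nil_iff] using (List.cons_eq_cons.mp hc).2
            exact ⟨(pvDiff_nil_iff as bs h).mp this, by simpa using hab⟩
  | succ n ih =>
    intro w word h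
    cases w with
    | nil =>
      cases word with
      | nil => simp [pvDiff]
      | cons b bs => simp only [List.length_nil, List.length_cons] at h; omega
    | cons a as =>
      cases word with
      | nil => simp at h
      | cons b bs =>
        simp only [List.length_cons, Nat.add_right_cancel_iff] at h
        simp only [List.take_succ_cons, List.drop_succ_cons, List.zip_cons_cons, pvDiff,
          List.getElem?_cons_succ, List.cons_eq_cons]
        by_cases hab : a = b
        · rw [if_pos hab]
          constructor
          · rintro ⟨⟨-, ht⟩, hd, hne⟩
            have := (ih as bs h).mp ⟨ht, hd, hne⟩
            simp [this]
          · intro hc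
            rcases List.map_eq_cons_iff.mp hc with ⟨k, ks, hrest, hk, hks⟩
            have hk' : k = n := by omega
            have hks' : ks = [] := List.map_eq_nil_iff.mp hks
            have : pvDiff (as.zip bs) = [n] := by rw [hrest, hk', hks']
            have := (ih as bs h).mpr this
            exact ⟨⟨hab, this.1⟩, this.2.1, this.2.2⟩
        · rw [if_neg hab]
          constructor
          · rintro ⟨⟨hab', -⟩, -, -⟩; exact absurd hab' hab
          · intro hc; exact absurd (List.cons_eq_cons.mp hc).1 (by omega)

-- folding an index-conditional update when no index satisfies the condition
theorem pvFoldl_ite_none {α : Type} (g : Nat → α → α) (p : Nat → Prop) [DecidablePred p] :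
    ∀ (l : List Nat) (res : α), (∀ i ∈ l, ¬ p i) →
      l.foldl (fun r i => if p i then g i r else r) res = res := by
  intro l
  induction l with
  | nil => intro res _; rfl
  | cons x xs ih =>
    intro res h
    simp only [List.foldl_cons, if_neg (h x (List.mem_cons_self ..))]
    exact ih res (fun i hi => h i (List.mem_cons_of_mem _ hi))

-- folding an index-conditional update when exactly the index j satisfies the condition
theorem pvFoldl_ite_unique {α : Type} (g : Nat → α → α) (p : Nat → Prop) [DecidablePred p] (j : Nat) :
    ∀ (l : List Nat) (res : α), (∀ i, p i ↔ i = j) → l.count j = 1 →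
      l.foldl (fun r i => if p i then g i r else r) res = g j res := by
  intro l
  induction l with
  | nil => intro res _ hc; simp at hc
  | cons x xs ih =>
    intro res hp hc
    by_cases hx : x = j
    · subst hx
      have hxs : xs.count x = 0 := by
        rw [List.count_cons_self] at hc; omega
      simp only [List.foldl_cons, if_pos ((hp x).mpr rfl)]
      exact pvFoldl_ite_none g p xs (g x res) (fun i hi h => by
        have : i = x := (hp i).mp h
        subst this
        exact absurd (List.count_pos_iff.mpr hi) (by omega))
    · have hc' : xs.count j = 1 := by
        rw [List.count_cons] at hc
        simpa [hx, Ne.symm hx] using hc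
      simp only [List.foldl_cons, if_neg (fun h => hx ((hp x).mp h))]
      exact ih res hp hc'

-- per-corpus-word step equality: A's index loop = B's one-pass scan update
theorem pvStep_eq (word w : List String) (h : w.length = word.length) (res : List Int) :
    pvInnerA word w res =
      (let st := pvScanB (w.zip word) 0 (0, -1)
       if st.1 = 1 then res.set st.2.toNat (res.getD st.2.toNat 0 + 1) else res) := by
  rw [pvScanB_zero]
  cases hd : pvDiff (w.zip word) with
  | nil =>
    simp only
    rw [if_neg (by simp)]
    exact pvFoldl_ite_none _ _ _ res (fun i _ hc => by
      have := (pvCondA_iff i w word h).mp hc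
      rw [hd] at this; cases this)
  | cons j rest =>
    cases rest with
    | nil =>
      simp only [Nat.zero_add, Int.toNat_natCast]
      have hj : j < word.length := by
        have := pvDiff_lt_length _ j (hd ▸ List.mem_cons_self ..)
        rwa [List.length_zip, h, Nat.min_self] at this
      refine pvFoldl_ite_unique _ _ j (List.range w.length) res
        (fun i => by rw [pvCondA_iff i w word h, hd]; simp [eq_comm]) ?_
      exact List.count_eq_one_of_mem List.nodup_range (by simp [h, hj])
    | cons j2 rest2 =>
      rw [if_neg (by simp)]
      exact pvFoldl_ite_none _ _ _ res (fun i _ hc => by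
        have := (pvCondA_iff i w word h).mp hc
        rw [hd] at this
        simp at this)

theorem pvZeros (n : Nat) : (List.range n).map (fun _ => (0 : Int)) = List.replicate n 0 := by
  rw [List.map_const', List.length_range]

-- ===== VERDICT (by name: the statement is the Claim_ definition above) =====
theorem find_position_neighbours_spec : Claim_equal_find_position_neighbours := by
  intro word corpus _ hpre
  unfold Spec_find_position_neighbours find_position_neighbours find_position_neighbours_alt
  simp only [pvZeros]
  apply PySem.List.foldl_congr_mem
  intro res kv hmem
  obtain ⟨k, v⟩ := kv
  have hget : (PySem.Dict.mk corpus).getD k [] = v :=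
    PySem.Dict.getD_of_mem_items (d := PySem.Dict.mk corpus) hmem hpre []
  simp only [hget]
  by_cases hlen : v.length = word.length
  · rw [if_neg (by simpa using hlen), if_neg (by simpa using hlen)]
    exact pvStep_eq word v hlen res
  · rw [if_pos (by simpa using hlen), if_pos (by simpa using hlen)]
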